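-- pv_equiv track=rewrite | github.com/tanyeun/CodeCamp | others/o1_SpanNum/Solution2.py | span
-- ===== SOURCE A (Python) =====
-- from typing import List
--
-- def span(nums: List) -> List:
--     index1 = []
--     out = [0]*len(nums)
--     for i in range(len(nums)):
--         if nums[i] == 1:
--             index1.append(i)
--
--     for i in range(len(index1)):
--         if i+1 < len(index1):
--             out[index1[i]] = index1[i+1] - index1[i]
--         if i+1 == len(index1) and i < len(nums):
--             out[index1[i]] = len(nums) - index1[i]
--
--     return out
-- ===== SOURCE B (Python) =====
-- def span(nums):
--     out = []
--     next_one = len(nums)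
--     i = len(nums) - 1
--     for x in reversed(nums):
--         if x == 1:
--             out.append(next_one - i)
--             next_one = i
--         else:
--             out.append(0)
--         i -= 1
--     out.reverse()
--     return out
-- ===== Notes on version B (the rewrite author's own statement) =====
-- stated objective: simpler
-- what changed: Replaces the two forward passes (collect all indices of 1s, then difference consecutive indices) with a single backward scan that maintains the index of the next 1 to the right.
import Mathlib
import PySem

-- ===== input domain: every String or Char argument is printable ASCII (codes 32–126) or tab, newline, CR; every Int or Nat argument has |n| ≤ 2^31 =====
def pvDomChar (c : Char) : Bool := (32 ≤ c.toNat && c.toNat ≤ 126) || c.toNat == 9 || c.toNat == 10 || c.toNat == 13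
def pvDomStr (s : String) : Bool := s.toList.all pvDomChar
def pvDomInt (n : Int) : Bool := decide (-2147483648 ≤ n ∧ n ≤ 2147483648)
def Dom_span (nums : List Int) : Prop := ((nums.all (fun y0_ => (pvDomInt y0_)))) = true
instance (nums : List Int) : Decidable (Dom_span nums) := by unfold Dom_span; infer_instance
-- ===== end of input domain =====

-- B replaces A's two forward passes (collect indices of 1s, then difference them) by a
-- single backward scan keeping the index of the next 1; same O(n) cost, simpler state.

-- ===== PORT A =====
-- A-side helper: A's first loop — collect the indices i with nums[i] == 1.
def collect1 (nums : List Int) : List Nat :=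
  (List.range nums.length).foldl
    (fun acc i => if nums.getD i 0 = 1 then acc ++ [i] else acc) []

-- A-side helper: A's second loop — write the consecutive differences (and n - last) into out.
def writeLoop (n : Nat) (idx : List Nat) (out : List Int) : List Int :=
  (List.range idx.length).foldl (fun out i =>
    let out := if i + 1 < idx.length then
        out.set (idx.getD i 0) ((idx.getD (i+1) 0 : Int) - (idx.getD i 0 : Int))
      else out
    if i + 1 = idx.length ∧ i < n then
        out.set (idx.getD i 0) ((n : Int) - (idx.getD i 0 : Int))
      else out) out

def span (nums : List Int) : List Int :=
  writeLoop nums.length (collect1 nums) (List.replicate nums.length 0)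

-- ===== PORT B =====
-- B-side helper: one step of B's backward scan (state = (out, next_one, i)).
def stepB (st : List Int × Int × Int) (x : Int) : List Int × Int × Int :=
  if x = 1 then (st.1 ++ [st.2.1 - st.2.2], st.2.2, st.2.2 - 1)
  else (st.1 ++ [0], st.2.1, st.2.2 - 1)

def span_alt (nums : List Int) : List Int :=
  let n : Int := nums.length
  (nums.reverse.foldl stepB ([], n, n - 1)).1.reverse

-- ===== PRECONDITION & SPEC =====
def Spec_span (nums : List Int) (out : List Int) : Prop := out = span_alt nums
instance (nums : List Int) (out : List Int) : Decidable (Spec_span nums out) := by unfold Spec_span; infer_instance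

-- ===== CLAIM (what is proved, stated in full; the proofs are below) =====
def Claim_equal_span : Prop := ∀ (nums : List Int), Dom_span nums → Spec_span nums (span nums)

-- ===== LEMMAS AND PROOFS =====

-- index (from the front) of the first 1, or the length if there is none
def first1 : List Int → Nat
  | [] => 0
  | x :: xs => if x = 1 then 0 else first1 xs + 1

-- the common reference form of the result
def specF : List Int → List Int
  | [] => []
  | x :: xs => (if x = 1 then ((first1 xs : Int) + 1) else 0) :: specF xs

-- ---------- B side ----------
theorem stepB_shift (ys : List Int) (c : Int) : ∀ out nx i,
    ys.foldl stepB (out, nx + c, i + c) =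
      ((ys.foldl stepB (out, nx, i)).1,
       (ys.foldl stepB (out, nx, i)).2.1 + c,
       (ys.foldl stepB (out, nx, i)).2.2 + c) := by
  induction ys with
  | nil => intro out nx i; simp
  | cons y ys ih =>
    intro out nx i
    simp only [List.foldl_cons, stepB]
    by_cases h : y = 1
    · simp only [if_pos h]
      rw [show nx + c - (i + c) = nx - i by ring, show i + c - 1 = (i - 1) + c by ring]
      exact ih _ _ _
    · simp only [if_neg h]
      rw [show i + c - 1 = (i - 1) + c by ring]
      exact ih _ _ _

theorem stepB_counter (ys : List Int) : ∀ out nx i,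
    (ys.foldl stepB (out, nx, i)).2.2 = i - ys.length := by
  induction ys with
  | nil => intro out nx i; simp
  | cons y ys ih =>
    intro out nx i
    simp only [List.foldl_cons, stepB]
    by_cases h : y = 1
    · simp only [if_pos h]; rw [ih]; push_cast [List.length_cons]; ring
    · simp only [if_neg h]; rw [ih]; push_cast [List.length_cons]; ring

theorem B_main (xs : List Int) :
    ((xs.reverse.foldl stepB ([], (xs.length : Int), (xs.length : Int) - 1)).1.reverse = specF xs)
    ∧ ((xs.reverse.foldl stepB ([], (xs.length : Int), (xs.length : Int) - 1)).2.1
        = (first1 xs : Int)) := by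
  induction xs with
  | nil => simp [specF, first1]
  | cons x xs ih =>
    have hlen : ((x :: xs).length : Int) = (xs.length : Int) + 1 := by
      push_cast [List.length_cons]; ring
    rw [List.reverse_cons, List.foldl_append, hlen,
      show (xs.length : Int) + 1 - 1 = ((xs.length : Int) - 1) + 1 by ring,
      stepB_shift]
    have hctr := stepB_counter xs.reverse [] (xs.length : Int) ((xs.length : Int) - 1)
    rw [List.foldl_cons, List.foldl_nil, hctr, List.length_reverse,
      show (xs.length : Int) - 1 - (xs.length : Int) + 1 = 0 by ring]
    obtain ⟨ih1, ih2⟩ := ih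
    set S := List.foldl stepB ([], (xs.length : Int), (xs.length : Int) - 1) xs.reverse with hS
    rw [stepB]
    by_cases h : x = 1
    · rw [if_pos h]
      subst h
      refine ⟨?_, by simp [first1]⟩
      simp only [List.reverse_append, List.reverse_cons, List.reverse_nil, List.nil_append,
        List.singleton_append]
      rw [ih1, ih2]
      simp [specF]
    · rw [if_neg h]
      refine ⟨?_, ?_⟩
      · simp only [List.reverse_append, List.reverse_cons, List.reverse_nil, List.nil_append,
          List.singleton_append]
        rw [ih1]
        simp [specF, h]
      · simp only [first1, if_neg h]
        rw [show ((S.1 ++ [0], S.2.1, S.2.2 - 1) : List Int × Int × Int).2.1 = S.2.1 from rfl]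
        rw [ih2]; push_cast; ring

theorem span_alt_eq_specF (xs : List Int) : span_alt xs = specF xs := by
  unfold span_alt; exact (B_main xs).1

-- ---------- A side ----------
def onesR : List Int → List Nat
  | [] => []
  | x :: xs => if x = 1 then 0 :: (onesR xs).map (· + 1) else (onesR xs).map (· + 1)

theorem foldl_append_if_gen (p : Nat → Prop) [DecidablePred p] (l : List Nat) : ∀ acc,
    l.foldl (fun acc i => if p i then acc ++ [i] else acc) acc
      = acc ++ l.filter (fun i => decide (p i)) := by
  induction l with
  | nil => intro acc; simp
  | cons a l ih =>
    intro acc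
    by_cases h : p a <;> simp [h, ih]

theorem collect1_eq_onesR (nums : List Int) : collect1 nums = onesR nums := by
  rw [collect1, foldl_append_if_gen, List.nil_append]
  induction nums with
  | nil => simp [onesR]
  | cons x xs ih =>
    rw [List.length_cons, List.range_succ_eq_map, List.filter_cons, List.filter_map]
    have hc : ((fun i => decide ((x :: xs).getD i 0 = 1)) ∘ Nat.succ)
        = (fun i => decide (xs.getD i 0 = 1)) := by
      funext i; simp
    rw [hc, ih]
    by_cases h : x = 1 <;> simp [onesR, h]

theorem onesR_length_le (nums : List Int) : (onesR nums).length ≤ nums.length := by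
  rw [← collect1_eq_onesR, collect1, foldl_append_if_gen, List.nil_append]
  calc ((List.range nums.length).filter _).length
      ≤ (List.range nums.length).length := List.length_filter_le _ _
    _ = nums.length := by simp

theorem onesR_nil_first1 : ∀ xs : List Int, onesR xs = [] → first1 xs = xs.length := by
  intro xs; induction xs with
  | nil => intro _; rfl
  | cons x xs ih =>
    intro h
    by_cases hx : x = 1
    · simp [onesR, hx] at h
    · simp only [onesR, if_neg hx, List.map_eq_nil_iff] at h
      simp [first1, hx, ih h]

theorem onesR_head_first1 : ∀ (xs : List Int) (a : Nat) (t : List Nat),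
    onesR xs = a :: t → a = first1 xs := by
  intro xs; induction xs with
  | nil => intro a t h; simp [onesR] at h
  | cons x xs ih =>
    intro a t h
    by_cases hx : x = 1
    · simp only [onesR, if_pos hx, List.cons.injEq] at h
      simp [first1, hx, ← h.1]
    · simp only [onesR, if_neg hx] at h
      cases ho : onesR xs with
      | nil => rw [ho] at h; simp at h
      | cons a' t' =>
        rw [ho, List.map_cons, List.cons.injEq] at h
        have := ih a' t' ho
        simp [first1, hx, ← h.1, this]

-- structural form of A's second loop
def setRec (n : Nat) : List Nat → List Int → List Int
  | [], out => out
  | a :: rest, out =>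
    match rest with
    | [] => out.set a ((n : Int) - (a : Int))
    | b :: _ => setRec n rest (out.set a ((b : Int) - (a : Int)))

theorem setRec_one (n a : Nat) (out : List Int) :
    setRec n [a] out = out.set a ((n : Int) - (a : Int)) := rfl

theorem setRec_cons2 (n a b : Nat) (rest : List Nat) (out : List Int) :
    setRec n (a :: b :: rest) out = setRec n (b :: rest) (out.set a ((b : Int) - (a : Int))) := rfl

theorem writeLoop_gen (n : Nat) (idx : List Nat) (hle : idx.length ≤ n) : ∀ d s (out : List Int),
    s + d = idx.length →
    (List.range' s d).foldl (fun out i =>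
      let out := if i + 1 < idx.length then
          out.set (idx.getD i 0) ((idx.getD (i+1) 0 : Int) - (idx.getD i 0 : Int))
        else out
      if i + 1 = idx.length ∧ i < n then
          out.set (idx.getD i 0) ((n : Int) - (idx.getD i 0 : Int))
        else out) out = setRec n (idx.drop s) out := by
  intro d
  induction d with
  | zero =>
    intro s out hs
    rw [Nat.add_zero] at hs
    simp [hs, List.drop_length, setRec]
  | succ d ih =>
    intro s out hs
    have hslt : s < idx.length := by omega
    have hdrop : idx.drop s = idx[s] :: idx.drop (s+1) := List.drop_eq_getElem_cons hslt
    have hgd : idx.getD s 0 = idx[s] := List.getD_eq_getElem idx 0 hslt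
    rw [List.range'_succ, List.foldl_cons]
    cases d with
    | zero =>
      have hand : s + 1 = idx.length ∧ s < n := ⟨by omega, by omega⟩
      have hnot : ¬ (s + 1 < idx.length) := by omega
      simp only [hgd, if_neg hnot, if_pos hand, List.range'_zero, List.foldl_nil]
      rw [hdrop, show idx.drop (s+1) = [] from by rw [hand.1, List.drop_length], setRec_one]
    | succ d' =>
      have h1 : s + 1 < idx.length := by omega
      have hgd1 : idx.getD (s+1) 0 = idx[s+1] := List.getD_eq_getElem idx 0 h1
      have hne : ¬ (s + 1 = idx.length ∧ s < n) := by omega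
      have hdrop1 : idx.drop (s+1) = idx[s+1] :: idx.drop (s+2) := List.drop_eq_getElem_cons h1
      simp only [hgd, hgd1, if_pos h1, if_neg hne]
      rw [hdrop, hdrop1, setRec_cons2, ← hdrop1]
      exact ih (s+1) _ (by omega)

theorem writeLoop_eq_setRec (n : Nat) (idx : List Nat) (hle : idx.length ≤ n) (out : List Int) :
    writeLoop n idx out = setRec n idx out := by
  rw [writeLoop, List.range_eq_range']
  simpa using writeLoop_gen n idx hle idx.length 0 out (by omega)

theorem setRec_shift (n : Nat) : ∀ (idx : List Nat) (h : Int) (out : List Int),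
    setRec (n+1) (idx.map (· + 1)) (h :: out) = h :: setRec n idx out := by
  intro idx
  induction idx with
  | nil => intro h out; simp [setRec]
  | cons a idx ih =>
    intro h out
    cases idx with
    | nil =>
      simp only [List.map_cons, List.map_nil, setRec_one]
      rw [show (((n+1 : Nat) : Int) - ((a+1 : Nat) : Int)) = (n : Int) - (a : Int) from by
        push_cast; ring]
      rfl
    | cons b idx' =>
      simp only [List.map_cons, setRec_cons2]
      rw [show (((b+1 : Nat) : Int) - ((a+1 : Nat) : Int)) = (b : Int) - (a : Int) from by
        push_cast; ring]
      rw [show ((h :: out).set (a+1) ((b : Int) - (a : Int)))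
            = h :: out.set a ((b : Int) - (a : Int)) from rfl]
      rw [show ((b + 1 : Nat) :: List.map (· + 1) idx' : List Nat)
            = List.map (· + 1) (b :: idx') from rfl]
      exact ih h (out.set a _)

theorem setRec_onesR : ∀ xs : List Int,
    setRec xs.length (onesR xs) (List.replicate xs.length 0) = specF xs := by
  intro xs; induction xs with
  | nil => rfl
  | cons x xs ih =>
    rw [List.length_cons, List.replicate_succ]
    by_cases hx : x = 1
    · rw [show onesR (x :: xs) = 0 :: (onesR xs).map (· + 1) from by
        simp only [onesR, if_pos hx]]
      cases ho : onesR xs with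
      | nil =>
        rw [ho] at ih
        simp only [List.map_nil, setRec_one, List.set_cons_zero]
        have h1 : first1 xs = xs.length := onesR_nil_first1 xs ho
        have h2 : List.replicate xs.length (0 : Int) = specF xs := ih
        rw [show specF (x :: xs) = ((first1 xs : Int) + 1) :: specF xs from by
          simp [specF, hx]]
        rw [h1, ← h2]
        congr 1
      | cons a t =>
        simp only [List.map_cons]
        rw [setRec_cons2, List.set_cons_zero,
          show ((a + 1 : Nat) :: List.map (· + 1) t : List Nat)
            = List.map (· + 1) (a :: t) from rfl,
          setRec_shift, ← ho, ih]
        have ha : a = first1 xs := onesR_head_first1 xs a t ho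
        rw [show specF (x :: xs) = ((first1 xs : Int) + 1) :: specF xs from by
          simp [specF, hx]]
        rw [← ha]
        congr 1
    · rw [show onesR (x :: xs) = (onesR xs).map (· + 1) from by
        simp only [onesR, if_neg hx]]
      rw [setRec_shift, ih]
      simp [specF, hx]

theorem span_eq_specF (nums : List Int) : span nums = specF nums := by
  rw [span, collect1_eq_onesR,
    writeLoop_eq_setRec nums.length (onesR nums) (onesR_length_le nums),
    setRec_onesR]

-- ===== VERDICT (by name: the statement is the Claim_ definition above) =====
theorem span_spec : Claim_equal_span := by
  intro nums _
  unfold Spec_span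
  rw [span_eq_specF, span_alt_eq_specF]
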